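-- pv_equiv track=rewrite | github.com/ShankarDuraisamy/leetcode | python/src/binary_matrix.py | solve
-- ===== SOURCE A (Python) =====
-- from typing import List
--
-- def solve(nums: List[List[int]]) -> int:
-- 	count = 0
-- 	for i in range(0, len(nums)):
-- 		row_sum = 0
-- 		colum_sum = 0
-- 		row_itr = 0
-- 		colum_itr = 0
-- 		while row_itr < len(nums[i]):
-- 			if i == row_itr:
-- 				row_itr += 1
-- 				continue
-- 			row_sum += nums[i][row_itr]
-- 			row_itr += 1
-- 		while colum_itr < len(nums):
-- 			colum_sum += nums[colum_itr][i]
-- 			colum_itr += 1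
-- 		count += 1 if row_sum + colum_sum == 1 else 0
-- 	return count
-- ===== SOURCE B (Python) =====
-- from typing import List
--
-- def solve(nums: List[List[int]]) -> int:
-- 	n = len(nums)
-- 	col = [0] * n
-- 	for row in nums:
-- 		col = [c + v for c, v in zip(col, row)]
-- 	count = 0
-- 	for i in range(n):
-- 		row_sum = sum(nums[i]) - nums[i][i]
-- 		if row_sum + col[i] == 1:
-- 			count += 1
-- 	return count
-- ===== Notes on version B (the rewrite author's own statement) =====
-- stated objective: alternative
-- what changed: B builds all column totals in one zip-accumulating pass over the rows and then does a single pass per index i using row total minus diagonal (C-level sum/zip instead of A's hand-rolled while loops re-scanning the matrix per index).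
import Mathlib
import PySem

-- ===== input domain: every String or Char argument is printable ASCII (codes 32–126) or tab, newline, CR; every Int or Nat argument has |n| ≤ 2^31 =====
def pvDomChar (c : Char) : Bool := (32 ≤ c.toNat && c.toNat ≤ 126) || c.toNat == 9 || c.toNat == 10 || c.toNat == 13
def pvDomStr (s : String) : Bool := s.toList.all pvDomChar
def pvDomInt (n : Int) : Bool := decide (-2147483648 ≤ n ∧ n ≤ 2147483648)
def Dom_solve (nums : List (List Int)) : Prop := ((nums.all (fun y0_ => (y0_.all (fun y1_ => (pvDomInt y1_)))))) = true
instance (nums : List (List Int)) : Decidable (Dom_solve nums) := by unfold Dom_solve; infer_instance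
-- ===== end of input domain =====

-- B replaces A's per-index while-loop rescans by a one-pass column-totals table plus a
-- row-total-minus-diagonal pass (alternative decomposition, same return value on Pre_).


-- ===== PORT A =====
-- A's inner 'while row_itr < len(nums[i])' loop (skips the diagonal index i)
def rowLoopA (row : List Int) (i : Nat) (itr : Nat) (acc : Int) : Int :=
  if itr < row.length then
    if i = itr then rowLoopA row i (itr + 1) acc
    else rowLoopA row i (itr + 1) (acc + row.getD itr 0)
  else acc
termination_by row.length - itr

-- A's inner 'while colum_itr < len(nums)' loop
def colLoopA (nums : List (List Int)) (i : Nat) (itr : Nat) (acc : Int) : Int :=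
  if itr < nums.length then
    colLoopA nums i (itr + 1) (acc + (nums.getD itr []).getD i 0)
  else acc
termination_by nums.length - itr

def solve (nums : List (List Int)) : Int :=
  (List.range nums.length).foldl
    (fun count i =>
      let row_sum := rowLoopA (nums.getD i []) i 0 0
      let colum_sum := colLoopA nums i 0 0
      count + (if row_sum + colum_sum = 1 then 1 else 0)) 0

-- ===== PORT B =====
def solve_alt (nums : List (List Int)) : Int :=
  let n := nums.length
  let col := nums.foldl (fun acc row => List.zipWith (· + ·) acc row) (List.replicate n (0 : Int))
  (List.range n).foldl
    (fun count i =>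
      let row := nums.getD i []
      let row_sum := row.sum - row.getD i 0
      if row_sum + col.getD i 0 = 1 then count + 1 else count) 0

-- ===== PRECONDITION & SPEC =====
-- Pre_ excludes ragged inputs with a row shorter than the number of rows: there A's column
-- loop (and B) hits an IndexError, so A returns no value.
def Pre_solve (nums : List (List Int)) : Prop :=
  ∀ row ∈ nums, nums.length ≤ row.length
instance (nums : List (List Int)) : Decidable (Pre_solve nums) := by unfold Pre_solve; infer_instance

def pvWitness_solve : List (List Int) := [[0, 1, 0], [1, 0, 0], [0, 0, 0]]

def Spec_solve (nums : List (List Int)) (out : Int) : Prop := out = solve_alt nums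
instance (nums : List (List Int)) (out : Int) : Decidable (Spec_solve nums out) := by unfold Spec_solve; infer_instance

-- ===== CLAIM (what is proved, stated in full; the proofs are below) =====
def Claim_equal_solve : Prop := ∀ (nums : List (List Int)), Dom_solve nums → Pre_solve nums → Spec_solve nums (solve nums)

-- ===== LEMMAS AND PROOFS =====

-- the row while-loop sums the whole row minus the diagonal entry (when i is in range)
theorem rowLoopA_eq (row : List Int) (i : Nat) :
    ∀ itr acc, rowLoopA row i itr acc =
      acc + (row.drop itr).sum - (if itr ≤ i ∧ i < row.length then row.getD i 0 else 0) := by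
  intro itr
  induction h : row.length - itr using Nat.strong_induction_on generalizing itr with
  | _ k ih =>
    intro acc
    unfold rowLoopA
    by_cases hlt : itr < row.length
    · have hd : row.drop itr = row[itr] :: row.drop (itr + 1) :=
        List.drop_eq_getElem_cons hlt
      have hrec : row.length - (itr + 1) < k := by omega
      have hget : row.getD itr 0 = row[itr] := by
        simp [List.getD, List.getElem?_eq_getElem hlt]
      by_cases hi : i = itr
      · subst hi
        rw [if_pos hlt, if_pos rfl, ih _ hrec (i + 1) rfl, hd, List.sum_cons,
          if_neg (by omega : ¬(i + 1 ≤ i ∧ i < row.length)),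
          if_pos ⟨Nat.le_refl i, hlt⟩, hget]
        ring
      · rw [if_pos hlt, if_neg hi, ih _ hrec (itr + 1) rfl, hd, List.sum_cons, hget]
        have hc : (itr + 1 ≤ i ∧ i < row.length) ↔ (itr ≤ i ∧ i < row.length) := by
          constructor <;> (intro h'; exact ⟨by omega, h'.2⟩)
        rw [if_congr hc rfl rfl]
        split_ifs <;> ring
    · rw [if_neg hlt, List.drop_eq_nil_of_le (by omega), if_neg (by omega)]
      simp

-- the column while-loop sums nums[r][i] over the remaining rows
theorem colLoopA_eq (nums : List (List Int)) (i : Nat) :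
    ∀ itr acc, colLoopA nums i itr acc =
      acc + ((nums.drop itr).map (fun row => row.getD i 0)).sum := by
  intro itr
  induction h : nums.length - itr using Nat.strong_induction_on generalizing itr with
  | _ k ih =>
    intro acc
    unfold colLoopA
    by_cases hlt : itr < nums.length
    · have hd : nums.drop itr = nums[itr] :: nums.drop (itr + 1) :=
        List.drop_eq_getElem_cons hlt
      have hrec : nums.length - (itr + 1) < k := by omega
      have hg : nums.getD itr [] = nums[itr] := by
        simp [List.getD, List.getElem?_eq_getElem hlt]
      rw [if_pos hlt, ih _ hrec (itr + 1) rfl, hg, hd, List.map_cons, List.sum_cons]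
      ring
    · rw [if_neg hlt, List.drop_eq_nil_of_le (by omega)]
      simp

-- B's zipWith fold: the i-th column total, provided every row is long enough
theorem colFold_getD (i : Nat) :
    ∀ (rows : List (List Int)) (acc : List Int),
      i < acc.length → (∀ row ∈ rows, acc.length ≤ row.length) →
      (rows.foldl (fun a row => List.zipWith (· + ·) a row) acc).getD i 0 =
        acc.getD i 0 + ((rows.map (fun row => row.getD i 0)).sum) := by
  intro rows
  induction rows with
  | nil => intro acc _ _; simp
  | cons r rs ih =>
    intro acc hi hlen
    have hr : acc.length ≤ r.length := hlen r (by simp)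
    have hlenz : (List.zipWith (· + ·) acc r).length = acc.length := by
      simp [List.length_zipWith]; omega
    rw [List.foldl_cons, ih _ (by omega) (by intro row hrow; rw [hlenz]; exact hlen row (by simp [hrow]))]
    have hir : i < r.length := by omega
    have hz : (List.zipWith (· + ·) acc r).getD i 0 = acc.getD i 0 + r.getD i 0 := by
      have h1 : i < (List.zipWith (· + ·) acc r).length := by omega
      simp [List.getD, hi, hir]
    rw [hz, List.map_cons, List.sum_cons]
    ring

theorem bodies_eq (nums : List (List Int)) (hpre : Pre_solve nums)
    (i : Nat) (hi : i < nums.length) :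
    (rowLoopA (nums.getD i []) i 0 0) + colLoopA nums i 0 0 =
      ((nums.getD i []).sum - (nums.getD i []).getD i 0) +
        ((nums.foldl (fun a row => List.zipWith (· + ·) a row)
            (List.replicate nums.length (0 : Int))).getD i 0) := by
  have hrow : nums.getD i [] = nums[i] := by
    simp [List.getD, List.getElem?_eq_getElem hi]
  have hlen : nums.length ≤ nums[i].length := hpre _ (List.getElem_mem hi)
  have hrep : (List.replicate nums.length (0 : Int)).getD i 0 = 0 := by
    simp [List.getD]
  rw [rowLoopA_eq, colLoopA_eq, colFold_getD i nums (List.replicate nums.length 0)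
      (by simp [hi]) (by intro row hr; simpa using hpre row hr), hrep]
  have hil : i < (nums.getD i []).length := by rw [hrow]; omega
  rw [if_pos ⟨Nat.zero_le i, hil⟩]
  simp

theorem solve_eq (nums : List (List Int)) (hpre : Pre_solve nums) :
    solve nums = solve_alt nums := by
  unfold solve solve_alt
  apply PySem.List.foldl_congr_mem
  intro count i hi
  have hi' : i < nums.length := List.mem_range.mp hi
  have hb := bodies_eq nums hpre i hi'
  simp only []
  rw [hb]
  split_ifs <;> omega

-- ===== VERDICT (by name: the statement is the Claim_ definition above) =====
theorem solve_spec : Claim_equal_solve := by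
  intro nums _ hpre
  unfold Spec_solve
  exact solve_eq nums hpre
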